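-- pv_equiv track=rewrite | github.com/apache/trafficserver | tools/hrw4u/src/visitor.py | _flatten_reindent
-- ===== SOURCE A (Python) =====
-- def _flatten_reindent(text: str, indent: str, source_indent: str | None = None) -> list[str]:
--     """Re-indent text: replace source indentation with target indent, preserving relative nesting.
--
--     If source_indent is None, it is auto-detected from the first non-empty line.
--     """
--     lines: list[str] = []
--
--     for line in text.splitlines():
--         stripped = line.strip()
--         if not stripped:
--             lines.append("")
--             continue
--
--         if source_indent is None:
--             source_indent = line[:len(line) - len(line.lstrip())]
--
--         if line.startswith(source_indent):
--             lines.append(f"{indent}{line[len(source_indent):]}")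
--         else:
--             lines.append(f"{indent}{stripped}")
--
--     return lines
-- ===== SOURCE B (Python) =====
-- def _reline(line, indent, si):
--     stripped = line.strip()
--     if not stripped:
--         return ""
--     if line.startswith(si):
--         return indent + line[len(si):]
--     return indent + stripped
--
--
-- def _flatten_reindent(text: str, indent: str, source_indent: str | None = None) -> list[str]:
--     lines = text.splitlines()
--     if source_indent is not None:
--         return [_reline(l, indent, source_indent) for l in lines]
--     # three-phase shape: blank prefix emitted wholesale, the pivot line fixes the
--     # source indent (its own leading whitespace always matches, so no startswith
--     # test is needed there), and the tail is a uniform map.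
--     k = 0
--     while k < len(lines) and not lines[k].strip():
--         k += 1
--     if k == len(lines):
--         return [""] * len(lines)
--     body = lines[k].lstrip()
--     si = lines[k][:len(lines[k]) - len(body)]
--     return [""] * k + [indent + body] + [_reline(l, indent, si) for l in lines[k + 1:]]
-- ===== Notes on version B (the rewrite author's own statement) =====
-- stated objective: alternative
-- what changed: Replaces A's single stateful loop (which detects the source indent lazily while mapping) with a three-phase decomposition: the blank prefix is emitted wholesale, the pivot line is re-indented without any startswith test (its own leading whitespace always matches, so it maps directly to indent + line.lstrip()), and the remaining lines are a uniform map against the now-fixed indent.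
import Mathlib
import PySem

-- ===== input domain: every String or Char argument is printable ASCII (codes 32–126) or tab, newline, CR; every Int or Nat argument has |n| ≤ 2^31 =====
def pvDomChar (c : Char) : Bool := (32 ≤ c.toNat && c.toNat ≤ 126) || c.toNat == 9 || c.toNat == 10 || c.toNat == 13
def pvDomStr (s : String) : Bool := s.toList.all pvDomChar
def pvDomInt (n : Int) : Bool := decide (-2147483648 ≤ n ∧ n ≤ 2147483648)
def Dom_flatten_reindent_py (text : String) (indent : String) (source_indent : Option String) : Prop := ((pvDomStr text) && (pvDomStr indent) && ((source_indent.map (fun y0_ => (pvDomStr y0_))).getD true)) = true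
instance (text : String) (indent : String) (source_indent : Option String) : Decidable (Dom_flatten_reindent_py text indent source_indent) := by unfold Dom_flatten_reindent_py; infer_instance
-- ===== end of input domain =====

-- B replaces A's stateful detect-while-mapping loop by a three-phase shape: blank prefix emitted
-- wholesale, the pivot line handled without a startswith test (its own prefix always matches), tail mapped uniformly.

-- ===== PORT A =====
-- one loop iteration of A: state = (current source_indent, accumulated lines)
def frStepA (indent : List Char) (st : Option (List Char) × List (List Char)) (line : List Char) :
    Option (List Char) × List (List Char) :=
  let stripped := PySem.Chars.strip line
  if stripped = [] then (st.1, st.2 ++ [[]])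
  else
    let si : List Char :=
      match st.1 with
      | some s => s
      | none => line.take (line.length - (PySem.Chars.lstrip line).length)
    if PySem.Chars.startswith line si then (some si, st.2 ++ [indent ++ line.drop si.length])
    else (some si, st.2 ++ [indent ++ stripped])

def flatten_reindent_py (text : String) (indent : String) (source_indent : Option String) : List String :=
  (((PySem.Chars.splitlines text.toList).foldl (frStepA indent.toList)
      (source_indent.map String.toList, [])).2).map String.ofList

-- ===== PORT B =====
-- _reline: re-indent one line against a known source indent
def frReline (indent si line : List Char) : List Char :=
  let stripped := PySem.Chars.strip line
  if stripped = [] then []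
  else if PySem.Chars.startswith line si then indent ++ line.drop si.length
  else indent ++ stripped

-- detection phase of B (the while-loop over the blank prefix, then pivot + uniform tail map)
def frGo (indent : List Char) (lines : List (List Char)) : List (List Char) :=
  match lines with
  | [] => []
  | line :: rest =>
    if PySem.Chars.strip line = [] then [] :: frGo indent rest
    else
      let body := PySem.Chars.lstrip line
      let si := line.take (line.length - body.length)
      (indent ++ body) :: rest.map (frReline indent si)

def flatten_reindent_py_alt (text : String) (indent : String) (source_indent : Option String) : List String :=
  let lines := PySem.Chars.splitlines text.toList
  match source_indent with
  | some s => lines.map (fun l => String.ofList (frReline indent.toList s.toList l))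
  | none => (frGo indent.toList lines).map String.ofList

-- ===== PRECONDITION & SPEC =====
def Spec_flatten_reindent_py (text : String) (indent : String) (source_indent : Option String) (out : List String) : Prop := out = flatten_reindent_py_alt text indent source_indent
instance (text : String) (indent : String) (source_indent : Option String) (out : List String) : Decidable (Spec_flatten_reindent_py text indent source_indent out) := by unfold Spec_flatten_reindent_py; infer_instance

-- ===== CLAIM (what is proved, stated in full; the proofs are below) =====
def Claim_equal_flatten_reindent_py : Prop := ∀ (text : String) (indent : String) (source_indent : Option String), Dom_flatten_reindent_py text indent source_indent → Spec_flatten_reindent_py text indent source_indent (flatten_reindent_py text indent source_indent)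

-- ===== LEMMAS AND PROOFS =====

-- the pivot line starts with its own leading whitespace
theorem pivot_startswith (line : List Char) :
    PySem.Chars.startswith line (line.take (line.length - (PySem.Chars.lstrip line).length)) = true := by
  rw [PySem.Chars.startswith_iff]; exact List.take_prefix _ _

-- dropping the pivot's leading whitespace leaves exactly its lstrip
theorem pivot_drop (line : List Char) :
    line.drop (line.length - (PySem.Chars.lstrip line).length) = PySem.Chars.lstrip line := by
  have hls : PySem.Chars.lstrip line = line.dropWhile PySem.Chars.isspace := by
    simp [PySem.Chars.lstrip]
  have hlen := congrArg List.length
    (List.takeWhile_append_dropWhile (p := PySem.Chars.isspace) (l := line))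
  rw [List.length_append] at hlen
  have h1 : line.length - (line.dropWhile PySem.Chars.isspace).length =
      (line.takeWhile PySem.Chars.isspace).length := by omega
  rw [hls, h1]
  nth_rewrite 2 [← List.takeWhile_append_dropWhile (p := PySem.Chars.isspace) (l := line)]
  exact List.drop_left

-- with the source indent resolved, A's fold is acc ++ the uniform map of B's _reline
theorem fold_some (indent s : List Char) (lines : List (List Char)) :
    ∀ acc : List (List Char),
      (lines.foldl (frStepA indent) (some s, acc)).2 = acc ++ lines.map (frReline indent s) := by
  induction lines with
  | nil => intro acc; simp
  | cons line rest ih =>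
    intro acc
    by_cases hst : PySem.Chars.strip line = []
    · rw [List.foldl_cons, show frStepA indent (some s, acc) line = (some s, acc ++ [[]]) from by
        simp [frStepA, hst], ih]
      simp [frReline, hst]
    · by_cases hsw : PySem.Chars.startswith line s = true
      · rw [List.foldl_cons, show frStepA indent (some s, acc) line =
            (some s, acc ++ [indent ++ line.drop s.length]) from by simp [frStepA, hst, hsw], ih]
        simp [frReline, hst, hsw]
      · rw [List.foldl_cons, show frStepA indent (some s, acc) line =
            (some s, acc ++ [indent ++ PySem.Chars.strip line]) from by simp [frStepA, hst, hsw], ih]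
        simp [frReline, hst, hsw]

-- with no source indent yet, A's fold is acc ++ B's three-phase result
theorem fold_none (indent : List Char) (lines : List (List Char)) :
    ∀ acc : List (List Char),
      (lines.foldl (frStepA indent) (none, acc)).2 = acc ++ frGo indent lines := by
  induction lines with
  | nil => intro acc; simp [frGo]
  | cons line rest ih =>
    intro acc
    by_cases hst : PySem.Chars.strip line = []
    · rw [List.foldl_cons, show frStepA indent (none, acc) line = (none, acc ++ [[]]) from by
        simp [frStepA, hst], ih]
      simp [frGo, hst]
    · have hstep : frStepA indent (none, acc) line =
          (some (line.take (line.length - (PySem.Chars.lstrip line).length)),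
            acc ++ [indent ++ PySem.Chars.lstrip line]) := by
        simp [frStepA, hst, pivot_startswith, pivot_drop]
      rw [List.foldl_cons, hstep, fold_some]
      simp [frGo, hst]

-- ===== VERDICT (by name: the statement is the Claim_ definition above) =====
theorem flatten_reindent_py_spec : Claim_equal_flatten_reindent_py := by
  intro text indent source_indent _
  unfold Spec_flatten_reindent_py flatten_reindent_py flatten_reindent_py_alt
  cases source_indent with
  | none =>
    rw [show Option.map String.toList (none : Option String) = none from rfl, fold_none]
    simp
  | some s =>
    rw [show Option.map String.toList (some s) = some s.toList from rfl, fold_some]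
    simp
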